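-- pv_equiv track=rewrite | github.com/blzzua/codewars | 7-kyu/clean_up_after_your_dog.py | crap
-- ===== SOURCE A (Python) =====
-- def crap(garden, bags, cap):
--     caps = bags * cap
--     for line in garden:
--         if 'D' in line:
--             return 'Dog!!'
--         caps = caps - line.count('@')
--     if caps >=0:
--         return 'Clean'
--     else:
--         return 'Cr@p'
-- ===== SOURCE B (Python) =====
-- def crap(garden, bags, cap):
--     # Build a character histogram of the whole garden in one pass,
--     # then decide everything by pure dictionary lookups.
--     freq = {}
--     for line in garden:
--         for ch in line:
--             freq[ch] = freq.get(ch, 0) + 1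
--     if freq.get('D', 0) > 0:
--         return 'Dog!!'
--     return 'Clean' if bags * cap >= freq.get('@', 0) else 'Cr@p'
-- ===== Notes on version B (the rewrite author's own statement) =====
-- stated objective: alternative
-- what changed: Replaces A's per-line loop with substring search, running capacity accumulator and early return by building a character-frequency dictionary (histogram) of the whole garden in one pass and then answering both questions ('D' present, '@' total vs bags*cap) by pure lookups in that table.
import Mathlib
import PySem

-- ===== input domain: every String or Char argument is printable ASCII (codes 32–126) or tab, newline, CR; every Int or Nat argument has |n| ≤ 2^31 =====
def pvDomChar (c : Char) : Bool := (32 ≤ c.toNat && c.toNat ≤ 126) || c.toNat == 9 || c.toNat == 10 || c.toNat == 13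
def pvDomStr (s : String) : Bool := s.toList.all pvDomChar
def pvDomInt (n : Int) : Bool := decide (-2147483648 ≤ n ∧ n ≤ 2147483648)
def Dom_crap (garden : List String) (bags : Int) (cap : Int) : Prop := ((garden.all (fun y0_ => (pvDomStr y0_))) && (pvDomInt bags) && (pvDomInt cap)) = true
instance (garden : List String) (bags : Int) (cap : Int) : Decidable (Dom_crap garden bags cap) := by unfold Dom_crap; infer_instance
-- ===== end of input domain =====

-- B replaces A's per-line loop (substring search, running capacity accumulator, early return) by a
-- character-frequency dictionary built in one pass over all characters, then pure lookups (objective: alternative).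

-- ===== PORT A =====
-- the for-loop with its early 'return' becomes structural recursion over the lines, carrying caps
def crapLoop (garden : List String) (caps : Int) : String :=
  match garden with
  | [] => if caps ≥ 0 then "Clean" else "Cr@p"
  | line :: rest =>
    if PySem.Str.isIn "D" line then "Dog!!"
    else crapLoop rest (caps - (PySem.Str.count line "@" : Int))

def crap (garden : List String) (bags : Int) (cap : Int) : String :=
  crapLoop garden (bags * cap)

-- ===== PORT B =====
-- freq[ch] = freq.get(ch, 0) + 1, over every character of every line
def crap_alt (garden : List String) (bags : Int) (cap : Int) : String :=
  let freq : PySem.Dict Char Int :=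
    garden.foldl (fun d line =>
      line.toList.foldl (fun d ch => d.insert ch (d.getD ch 0 + 1)) d) PySem.Dict.empty
  if freq.getD 'D' 0 > 0 then "Dog!!"
  else if bags * cap ≥ freq.getD '@' 0 then "Clean" else "Cr@p"

-- ===== PRECONDITION & SPEC =====
def Spec_crap (garden : List String) (bags : Int) (cap : Int) (out : String) : Prop := out = crap_alt garden bags cap
instance (garden : List String) (bags : Int) (cap : Int) (out : String) : Decidable (Spec_crap garden bags cap out) := by unfold Spec_crap; infer_instance

-- ===== CLAIM (what is proved, stated in full; the proofs are below) =====
def Claim_equal_crap : Prop := ∀ (garden : List String) (bags : Int) (cap : Int), Dom_crap garden bags cap → Spec_crap garden bags cap (crap garden bags cap)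

-- ===== LEMMAS AND PROOFS =====

-- Python's s.count(c) for a single character c is the plain character count
theorem count_go_singleton (c : Char) (l : List Char) (fuel : Nat) (acc : Nat)
    (h : l.length ≤ fuel) :
    PySem.Chars.count.go [c] fuel l acc = acc + l.count c := by
  induction l generalizing fuel acc with
  | nil => cases fuel <;> simp [PySem.Chars.count.go]
  | cons x t ih =>
    cases fuel with
    | zero => simp at h
    | succ n =>
      simp only [List.length_cons, Nat.succ_le_succ_iff] at h
      by_cases hx : x = c
      · subst hx
        simp [PySem.Chars.count.go, List.isPrefixOf, ih n (acc + 1) h]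
        omega
      · simp [PySem.Chars.count.go, List.isPrefixOf, hx, ih n acc h, Ne.symm hx]

theorem chars_count_singleton (c : Char) (l : List Char) :
    PySem.Chars.count l [c] = l.count c := by
  simp [PySem.Chars.count, count_go_singleton c l l.length 0 le_rfl]

theorem chars_isIn_singleton (c : Char) (l : List Char) :
    PySem.Chars.isIn [c] l = decide (c ∈ l) := by
  by_cases h : c ∈ l
  · obtain ⟨s, t, rfl⟩ := List.append_of_mem h
    have : [c] <:+: s ++ c :: t := ⟨s, t, by simp⟩
    rw [(PySem.Chars.isIn_iff_infix _ _).2 this]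
    simp [h]
  · have hni : ¬ ([c] <:+: l) := fun hi => h (hi.sublist.subset (by simp))
    rw [(PySem.Chars.isIn_eq_false_iff _ _).2 hni]
    simp [h]

-- the inner histogram loop adds each character's count onto the dictionary
theorem getD_histLine (l : List Char) (d : PySem.Dict Char Int) (c : Char) :
    (l.foldl (fun d ch => d.insert ch (d.getD ch 0 + 1)) d).getD c 0
      = d.getD c 0 + l.count c := by
  induction l generalizing d with
  | nil => simp
  | cons x t ih =>
    simp only [List.foldl_cons, ih, PySem.Dict.getD_insert, List.count_cons]
    by_cases hx : x = c
    · subst hx; simp; omega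
    · simp [hx, Ne.symm hx]

-- the outer loop: the lookup in the finished histogram is the total count over all lines
theorem getD_hist (garden : List String) (d : PySem.Dict Char Int) (c : Char) :
    (garden.foldl (fun d line =>
        line.toList.foldl (fun d ch => d.insert ch (d.getD ch 0 + 1)) d) d).getD c 0
      = d.getD c 0 + (garden.map (fun line => (line.toList.count c : Int))).sum := by
  induction garden generalizing d with
  | nil => simp
  | cons line rest ih =>
    simp only [List.foldl_cons, ih, getD_histLine, List.map_cons, List.sum_cons]
    ring

-- casting a sum of Nat counts
theorem sum_cast (garden : List String) (c : Char) :
    (garden.map (fun line => (line.toList.count c : Int))).sum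
      = (((garden.map (fun line => line.toList.count c)).sum : Nat) : Int) := by
  induction garden with
  | nil => simp
  | cons line rest ih => simp [ih]

-- characterisation of A's loop: early dog return = any-line test; accumulator = total count
theorem crapLoop_eq (garden : List String) (caps : Int) :
    crapLoop garden caps =
      if garden.any (fun line => line.toList.contains 'D') then "Dog!!"
      else if caps - ((garden.map (fun line => line.toList.count '@')).sum : Int) ≥ 0
           then "Clean" else "Cr@p" := by
  induction garden generalizing caps with
  | nil => simp [crapLoop]
  | cons line rest ih =>
    simp only [crapLoop, PySem.Str.isIn_eq]
    by_cases hD : 'D' ∈ line.toList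
    · simp [chars_isIn_singleton, hD]
    · simp [chars_isIn_singleton, hD, ih, PySem.Str.count_eq, chars_count_singleton,
        sub_sub]

-- ===== VERDICT (by name: the statement is the Claim_ definition above) =====
theorem crap_spec : Claim_equal_crap := by
  intro garden bags cap _
  unfold Spec_crap crap crap_alt
  rw [crapLoop_eq]
  simp only [getD_hist, PySem.Dict.getD_empty, zero_add, sum_cast]
  have hDcnt : ((0 : Int) < (((garden.map (fun line => line.toList.count 'D')).sum : Nat) : Int))
      ↔ garden.any (fun line => line.toList.contains 'D') = true := by
    rw [Int.natCast_pos, Nat.pos_iff_ne_zero]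
    simp only [ne_eq, List.sum_eq_zero_iff, List.mem_map, List.any_eq_true,
      List.contains_eq_mem, decide_eq_true_eq]
    constructor
    · intro h
      by_contra hall
      push Not at hall
      apply h
      intro n hn
      obtain ⟨line, hline, rfl⟩ := hn
      simp [List.count_eq_zero, hall line hline]
    · rintro ⟨line, hline, hc⟩ h
      have := h _ ⟨line, hline, rfl⟩
      rw [List.count_eq_zero] at this
      exact this hc
  by_cases hD : garden.any (fun line => line.toList.contains 'D') = true
  · rw [if_pos hD, if_pos (hDcnt.2 hD)]
  · rw [if_neg hD, if_neg (fun h => hD (hDcnt.1 h))]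
    have heq : bags * cap - (((garden.map (fun line => line.toList.count '@')).sum : Nat) : Int) ≥ 0
        ↔ bags * cap ≥ (((garden.map (fun line => line.toList.count '@')).sum : Nat) : Int) := by omega
    by_cases hc : bags * cap ≥ (((garden.map (fun line => line.toList.count '@')).sum : Nat) : Int)
    · rw [if_pos (heq.2 hc), if_pos hc]
    · rw [if_neg (fun h => hc (heq.1 h)), if_neg hc]
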